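-- pv_equiv track=rewrite | github.com/HappySatanCry/SYNERGY_PRACTICE | Массив_Сумма_Отрц.py | sum_negative_arr_A
-- ===== SOURCE A (Python) =====
-- def sum_negative_arr_A(arr):
--     if len(arr) <= 2:
--         return 0
--
--     sorted_arr = sorted(arr)
--     sum_neg = 0
--
--     for num in sorted_arr[1:-1]:
--         if num < 0:
--             sum_neg += num
--
--     return sum_neg
-- ===== SOURCE B (Python) =====
-- def sum_negative_arr_A(arr):
--     if len(arr) <= 2:
--         return 0
--     total = 0
--     mn = arr[0]
--     mx = arr[0]
--     for x in arr:
--         if x < 0: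
--             total += x
--         if x < mn:
--             mn = x
--         if x > mx:
--             mx = x
--     if mn < 0:
--         total -= mn
--     if mx < 0:
--         total -= mx
--     return total
-- ===== Notes on version B (the rewrite author's own statement) =====
-- stated objective: alternative
-- what changed: Replaced sort-then-slice-then-scan with a single explicit pass keeping three accumulators (sum of negatives, running min, running max) and subtracting one min/max occurrence if negative; asymptotically O(n) vs O(n log n) but not measurably faster in CPython, where sorted() runs in C.
import Mathlib
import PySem

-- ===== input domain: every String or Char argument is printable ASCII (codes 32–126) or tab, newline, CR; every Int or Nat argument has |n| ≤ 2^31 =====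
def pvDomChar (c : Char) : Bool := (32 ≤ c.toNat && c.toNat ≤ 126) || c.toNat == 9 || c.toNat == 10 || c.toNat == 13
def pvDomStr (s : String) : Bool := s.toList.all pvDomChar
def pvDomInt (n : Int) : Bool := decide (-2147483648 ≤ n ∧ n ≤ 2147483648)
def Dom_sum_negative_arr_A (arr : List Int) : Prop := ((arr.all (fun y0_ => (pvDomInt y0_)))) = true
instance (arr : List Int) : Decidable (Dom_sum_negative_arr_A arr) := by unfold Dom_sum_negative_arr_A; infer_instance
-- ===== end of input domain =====

-- B replaces A's sort + slice + scan with a single pass keeping three accumulators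
-- (sum of negatives, running min, running max); objective: alternative algorithm.


-- ===== PORT A =====
def sum_negative_arr_A (arr : List Int) : Int :=
  if arr.length ≤ 2 then 0
  else
    let sorted_arr := PySem.List.sorted arr (fun x => x) false
    (PySem.List.slice sorted_arr (some 1) (some (-1))).foldl
      (fun sum_neg num => if num < 0 then sum_neg + num else sum_neg) 0

-- ===== PORT B =====
def sum_negative_arr_A_alt (arr : List Int) : Int :=
  if arr.length ≤ 2 then 0
  else
    -- arr[0]: in range, since length > 2 here
    let a0 := PySem.List.pyGetD arr 0 0
    let st := arr.foldl
      (fun (st : Int × Int × Int) x =>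
        (if x < 0 then st.1 + x else st.1,
         if x < st.2.1 then x else st.2.1,
         if st.2.2 < x then x else st.2.2)) (0, a0, a0)
    let total := if st.2.1 < 0 then st.1 - st.2.1 else st.1
    if st.2.2 < 0 then total - st.2.2 else total

-- ===== PRECONDITION & SPEC =====
def Spec_sum_negative_arr_A (arr : List Int) (out : Int) : Prop := out = sum_negative_arr_A_alt arr
instance (arr : List Int) (out : Int) : Decidable (Spec_sum_negative_arr_A arr out) := by unfold Spec_sum_negative_arr_A; infer_instance

-- ===== CLAIM (what is proved, stated in full; the proofs are below) =====
def Claim_equal_sum_negative_arr_A : Prop := ∀ (arr : List Int), Dom_sum_negative_arr_A arr → Spec_sum_negative_arr_A arr (sum_negative_arr_A arr)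

-- ===== LEMMAS AND PROOFS =====

-- `if x < 0 then x else 0`: the contribution of one element to the sum of negatives
def pvNegPart (x : Int) : Int := if x < 0 then x else 0

-- A's accumulation loop computes the sum of the negative parts
theorem foldl_sumNeg (l : List Int) (s : Int) :
    l.foldl (fun sum_neg num => if num < 0 then sum_neg + num else sum_neg) s
      = s + (l.map pvNegPart).sum := by
  induction l generalizing s with
  | nil => simp
  | cons x xs ih =>
    simp only [List.foldl_cons, List.map_cons, List.sum_cons, ih, pvNegPart]
    split_ifs <;> ring

-- B's triple fold = (sum of negative parts, running min, running max)
theorem foldl_triple (l : List Int) (s mn mx : Int) :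
    l.foldl (fun (st : Int × Int × Int) x =>
        (if x < 0 then st.1 + x else st.1,
         if x < st.2.1 then x else st.2.1,
         if st.2.2 < x then x else st.2.2)) (s, mn, mx)
      = (s + (l.map pvNegPart).sum, l.foldl min mn, l.foldl max mx) := by
  induction l generalizing s mn mx with
  | nil => simp
  | cons x xs ih =>
    have h1 : (if x < mn then x else mn) = min mn x := by
      rw [min_def]; split_ifs <;> omega
    have h2 : (if mx < x then x else mx) = max mx x := by
      rw [max_def]; split_ifs <;> omega
    have h3 : (if x < 0 then s + x else s) = s + pvNegPart x := by
      simp only [pvNegPart]; split_ifs <;> ring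
    simp only [List.foldl_cons, List.map_cons, List.sum_cons, h1, h2, ih, h3, add_assoc]

-- the conditional subtraction in B removes exactly the negative part
theorem sub_negPart (t v : Int) : (if v < 0 then t - v else t) = t - pvNegPart v := by
  simp only [pvNegPart]; split_ifs <;> ring

-- slicing [1:-1] off a list written head :: middle ++ [last]
theorem slice_one_neg_one (m M : Int) (mid : List Int) :
    PySem.List.slice (m :: mid ++ [M]) (some 1) (some (-1)) = mid := by
  simp [PySem.List.slice, PySem.List.clampIdx]
  rw [if_neg (by omega)]
  simp

-- ===== VERDICT (by name: the statement is the Claim_ definition above) =====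
theorem sum_negative_arr_A_spec : Claim_equal_sum_negative_arr_A := by
  unfold Claim_equal_sum_negative_arr_A Spec_sum_negative_arr_A
  intro arr _
  unfold sum_negative_arr_A sum_negative_arr_A_alt
  by_cases hlen : arr.length ≤ 2
  · simp [hlen]
  · simp only [if_neg hlen]
    -- arr is nonempty
    obtain ⟨a, t, rfl⟩ : ∃ a t, arr = a :: t := by
      cases arr with
      | nil => simp at hlen
      | cons a t => exact ⟨a, t, rfl⟩
    -- decompose the sorted list as m :: mid ++ [M]
    set s := PySem.List.sorted (a :: t) (fun x => x) false with hs
    have hsl : s.length = (a :: t).length := PySem.List.length_sorted _ _ _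
    obtain ⟨m, u, hsu⟩ : ∃ m u, s = m :: u := by
      cases hcs : s with
      | nil => rw [hcs] at hsl; simp at hsl
      | cons m u => exact ⟨m, u, rfl⟩
    have hune : u ≠ [] := by
      intro h; rw [hsu, h] at hsl; simp at hsl
      rw [hsl] at hlen; simp at hlen
    obtain ⟨mid, M, humid⟩ : ∃ mid M, u = mid ++ [M] :=
      ⟨u.dropLast, u.getLast hune, (List.dropLast_append_getLast hune).symm⟩
    have hdecomp : s = m :: mid ++ [M] := by rw [hsu, humid]; rfl
    -- permutation: sorted s is a rearrangement of a :: t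
    have hperm : s.Perm (a :: t) := PySem.List.sorted_perm _ _ _
    -- order facts from Pairwise (· ≤ ·) on s
    have hpw : s.Pairwise (fun x y => x ≤ y) := PySem.List.sorted_pairwise (a :: t) (fun x => x) 
    have hm_le : ∀ y ∈ s, m ≤ y := by
      rw [hdecomp] at hpw ⊢
      intro y hy
      rcases List.mem_cons.mp hy with h | h
      · omega
      · exact (List.pairwise_cons.mp hpw).1 y h
    have hle_M : ∀ y ∈ s, y ≤ M := by
      rw [hdecomp] at hpw ⊢
      intro y hy
      have hpw2 := List.pairwise_cons.mp hpw
      rcases List.mem_cons.mp hy with h | h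
      · subst h; exact hpw2.1 M (by simp)
      · rcases (List.mem_append.mp h) with h' | h'
        · exact (List.pairwise_append.mp hpw2.2).2.2 y h' M (by simp)
        · simp at h'; omega
    -- B's running min is m and running max is M
    have hmmem : m ∈ (a : Int) :: t := hperm.mem_iff.mp (by rw [hdecomp]; simp)
    have hMmem : M ∈ (a : Int) :: t := hperm.mem_iff.mp (by rw [hdecomp]; simp)
    have hminq : ((a : Int) :: a :: t).min? = some (((a : Int) :: t).foldl min a) := rfl
    have hmaxq : ((a : Int) :: a :: t).max? = some (((a : Int) :: t).foldl max a) := rfl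
    have hmn_mem : ((a : Int) :: t).foldl min a ∈ (a : Int) :: t := by
      have := List.min?_mem hminq
      rcases List.mem_cons.mp this with h | h
      · rw [h]; simp
      · exact h
    have hmx_mem : ((a : Int) :: t).foldl max a ∈ (a : Int) :: t := by
      have := List.max?_mem hmaxq
      rcases List.mem_cons.mp this with h | h
      · rw [h]; simp
      · exact h
    have hmn_le : ∀ b ∈ (a : Int) :: t, ((a : Int) :: t).foldl min a ≤ b := by
      intro b hb
      exact ((List.le_min?_iff hminq).mp le_rfl) b (List.mem_cons_of_mem _ hb)
    have hle_mx : ∀ b ∈ (a : Int) :: t, b ≤ ((a : Int) :: t).foldl max a := by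
      intro b hb
      exact ((List.max?_le_iff hmaxq).mp le_rfl) b (List.mem_cons_of_mem _ hb)
    have hmn : ((a : Int) :: t).foldl min a = m :=
      le_antisymm (hmn_le m hmmem) (hm_le _ (hperm.mem_iff.mpr (hmn_mem)))
    have hmx : ((a : Int) :: t).foldl max a = M :=
      le_antisymm (hle_M _ (hperm.mem_iff.mpr (hmx_mem))) (hle_mx M hMmem)
    -- sums of negative parts agree up to the permutation
    have hsum : (s.map pvNegPart).sum = (((a : Int) :: t).map pvNegPart).sum :=
      (hperm.map pvNegPart).sum_eq
    -- compute both sides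
    have ha0 : PySem.List.pyGetD ((a : Int) :: t) 0 0 = a := by simp [PySem.List.pyGetD, PySem.List.pyGet?, PySem.List.pyIdx?]
    simp only [ha0, hdecomp, slice_one_neg_one, foldl_sumNeg, foldl_triple, hmn, hmx,
      sub_negPart]
    have : (((a : Int) :: t).map pvNegPart).sum
        = pvNegPart m + (mid.map pvNegPart).sum + pvNegPart M := by
      rw [← hsum, hdecomp]; simp; ring
    rw [this]; ring
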